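-- pv_equiv track=rewrite | github.com/EBNSchindi/dj-music-cleanup | src/music_cleanup/core/streaming.py | batch_stream
-- ===== SOURCE A (Python) =====
-- from typing import Generator, Iterator, Any, Dict, List, Optional, Callable, TypeVar, Union
--
-- T = TypeVar('T')
--
-- def batch_stream(stream: Iterator[T], batch_size: int) -> Generator[List[T], None, None]:
--     """Convert stream into batches of specified size"""
--     batch = []
--
--     for item in stream:
--         batch.append(item)
--
--         if len(batch) >= batch_size:
--             yield batch
--             batch = []
--
--     # Yield remaining items
--     if batch:
--         yield batch
-- ===== SOURCE B (Python) =====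
-- def batch_stream(stream, batch_size):
--     """Convert stream into batches of specified size"""
--     items = list(stream)
--     size = max(batch_size, 1)  # sizes <= 0 degenerate to one item per batch, as in the original
--     while items:
--         yield items[:size]
--         items = items[size:]
-- ===== Notes on version B (the rewrite author's own statement) =====
-- stated objective: simpler
-- what changed: B materializes the stream once and repeatedly slices off items[:size] / items[size:] with size clamped to at least 1, instead of A's per-item accumulator loop with a length check and a trailing-batch flush.
import Mathlib
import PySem

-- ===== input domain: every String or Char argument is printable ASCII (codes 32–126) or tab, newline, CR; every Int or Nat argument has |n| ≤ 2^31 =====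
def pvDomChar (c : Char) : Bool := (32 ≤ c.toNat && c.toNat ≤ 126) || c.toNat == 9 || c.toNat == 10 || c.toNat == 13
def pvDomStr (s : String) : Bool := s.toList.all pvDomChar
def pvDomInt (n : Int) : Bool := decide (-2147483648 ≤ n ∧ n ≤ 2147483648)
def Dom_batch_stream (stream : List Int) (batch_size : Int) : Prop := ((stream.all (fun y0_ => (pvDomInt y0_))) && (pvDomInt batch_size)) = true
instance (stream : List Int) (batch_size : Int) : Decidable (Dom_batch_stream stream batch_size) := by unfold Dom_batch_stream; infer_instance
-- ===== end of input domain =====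

-- B replaces A's one-item-at-a-time accumulator loop with repeated list slicing
-- (items[:size] / items[size:]), clamping the size to ≥ 1, which matches A's
-- per-item singleton batches for batch_size ≤ 0; objective: simpler.

-- ===== PORT A =====
-- fold state: (batches yielded so far, current batch)
def batch_stream (stream : List Int) (batch_size : Int) : List (List Int) :=
  let st := stream.foldl
    (fun (st : List (List Int) × List Int) item =>
      let batch := st.2 ++ [item]
      if batch_size ≤ (batch.length : Int) then (st.1 ++ [batch], ([] : List Int))
      else (st.1, batch))
    ([], [])
  if st.2 ≠ [] then st.1 ++ [st.2] else st.1

-- ===== PORT B =====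
-- the while-loop of Source B; size = n+1 ≥ 1, so items[:size] = x :: xs.take n and
-- items[size:] = xs.drop n on a nonempty items = x :: xs (exact for positive size)
def batchLoop (n : Nat) : List Int → List (List Int)
  | [] => []
  | x :: xs => (x :: xs.take n) :: batchLoop n (xs.drop n)
termination_by l => l.length
decreasing_by simp

def batch_stream_alt (stream : List Int) (batch_size : Int) : List (List Int) :=
  let size := max batch_size 1
  batchLoop (size.toNat - 1) stream

-- ===== PRECONDITION & SPEC =====
def Spec_batch_stream (stream : List Int) (batch_size : Int) (out : List (List Int)) : Prop := out = batch_stream_alt stream batch_size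
instance (stream : List Int) (batch_size : Int) (out : List (List Int)) : Decidable (Spec_batch_stream stream batch_size out) := by unfold Spec_batch_stream; infer_instance

-- ===== CLAIM (what is proved, stated in full; the proofs are below) =====
def Claim_equal_batch_stream : Prop := ∀ (stream : List Int) (batch_size : Int), Dom_batch_stream stream batch_size → Spec_batch_stream stream batch_size (batch_stream stream batch_size)

-- ===== LEMMAS AND PROOFS =====

-- A's fold, with the condition rewritten to the clamped Nat size n+1
def stepN (n : Nat) (st : List (List Int) × List Int) (item : Int) :
    List (List Int) × List Int :=
  let batch := st.2 ++ [item]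
  if n + 1 ≤ batch.length then (st.1 ++ [batch], ([] : List Int)) else (st.1, batch)

theorem step_eq_stepN (batch_size : Int) (n : Nat)
    (hn : n = (max batch_size 1).toNat - 1) :
    (fun (st : List (List Int) × List Int) item =>
      let batch := st.2 ++ [item]
      if batch_size ≤ (batch.length : Int) then (st.1 ++ [batch], ([] : List Int))
      else (st.1, batch)) = stepN n := by
  funext st item
  have hlen : (st.2 ++ [item]).length = st.2.length + 1 := by simp
  simp only [stepN, hlen]
  have h : (batch_size ≤ (st.2.length : Int) + 1) ↔ (n ≤ st.2.length) := by
    subst hn; omega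
  simp [h]

theorem batchLoop_cons_eq (n : Nat) (l : List Int) (hl : l ≠ []) :
    batchLoop n l = l.take (n + 1) :: batchLoop n (l.drop (n + 1)) := by
  cases l with
  | nil => simp at hl
  | cons x xs => rw [batchLoop]; simp

theorem foldl_stepN (n : Nat) :
    ∀ (stream : List Int) (acc : List (List Int)) (b : List Int), b.length ≤ n →
      (let st := stream.foldl (stepN n) (acc, b)
       if st.2 ≠ [] then st.1 ++ [st.2] else st.1) = acc ++ batchLoop n (b ++ stream) := by
  intro stream
  induction stream with
  | nil =>
    intro acc b hb
    cases b with
    | nil => simp only [List.foldl_nil, List.append_nil]; rw [batchLoop]; simp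
    | cons y ys =>
      simp only [List.foldl_nil, List.append_nil]
      have h1 : ys.take n = ys := List.take_of_length_le (by simp at hb; omega)
      have h2 : ys.drop n = [] := List.drop_eq_nil_of_le (by simp at hb; omega)
      rw [batchLoop, h1, h2, batchLoop]
      simp
  | cons item rest ih =>
    intro acc b hb
    simp only [List.foldl_cons]
    by_cases hfull : n + 1 ≤ (b ++ [item]).length
    · have hstep : stepN n (acc, b) item = (acc ++ [b ++ [item]], []) := by
        simp only [stepN]
        rw [if_pos hfull]
      rw [hstep, ih (acc ++ [b ++ [item]]) [] (by simp)]
      have hblen : (b ++ [item]).length = n + 1 := by simp at hfull ⊢; omega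
      have hcons : batchLoop n (b ++ item :: rest)
          = (b ++ [item]) :: batchLoop n rest := by
        rw [batchLoop_cons_eq n (b ++ item :: rest) (by simp)]
        have he : b ++ item :: rest = (b ++ [item]) ++ rest := by simp
        rw [he, ← hblen, List.take_left, List.drop_left]
      simp [hcons]
    · have hstep : stepN n (acc, b) item = (acc, b ++ [item]) := by
        simp only [stepN]
        rw [if_neg hfull]
      rw [hstep, ih acc (b ++ [item]) (by simp at hfull ⊢; omega)]
      simp

-- ===== VERDICT (by name: the statement is the Claim_ definition above) =====
theorem batch_stream_spec : Claim_equal_batch_stream := by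
  intro stream batch_size _
  unfold Spec_batch_stream batch_stream batch_stream_alt
  rw [step_eq_stepN batch_size ((max batch_size 1).toNat - 1) rfl]
  have := foldl_stepN ((max batch_size 1).toNat - 1) stream [] [] (by simp)
  simpa using this
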